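-- pv_equiv track=rewrite | github.com/akraemer007/baseball-app | jobs/recaps/interest.py | _classify_comeback
-- ===== SOURCE A (Python) =====
-- from typing import Any
--
-- def _int(v: Any, default: int = 0) -> int:
--     try:
--         return int(v) if v is not None else default
--     except (ValueError, TypeError):
--         return default
--
-- def _cumulative_through(innings: list[dict], side: str, up_to_inning: int) -> int:
--     total = 0
--     for row in innings:
--         if _int(row.get("inning")) <= up_to_inning:
--             total += _int(row.get(side))
--     return total
--
-- def _classify_comeback(game: dict, innings: list[dict]) -> tuple[bool, int, int]:
--     """Winning team trailed by 3+ after the 6th inning. Returns (is_comeback,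
--     deficit_size, inning_trailing_through)."""
--     if not innings:
--         return (False, 0, 0)
--     home_wins = game["home_score"] > game["away_score"]
--     for through_inn in (6, 5, 4, 3):
--         h = _cumulative_through(innings, "home", through_inn)
--         a = _cumulative_through(innings, "away", through_inn)
--         deficit = (a - h) if home_wins else (h - a)
--         if deficit >= 3:
--             return (True, deficit, through_inn)
--     return (False, 0, 0)
-- ===== SOURCE B (Python) =====
-- from typing import Any
--
-- def _int(v: Any, default: int = 0) -> int:
--     try:
--         return int(v) if v is not None else default
--     except (ValueError, TypeError):
--         return default
--
-- def _classify_comeback(game: dict, innings: list[dict]) -> tuple[bool, int, int]: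
--     """Single pass over innings maintaining running (home, away) totals for every
--     threshold 3..6, then one scan over the thresholds (highest first)."""
--     if not innings:
--         return (False, 0, 0)
--     home_wins = game["home_score"] > game["away_score"]
--     sums = {t: [0, 0] for t in (3, 4, 5, 6)}
--     for row in innings:
--         inn = _int(row.get("inning"))
--         h = _int(row.get("home"))
--         a = _int(row.get("away"))
--         for t in (3, 4, 5, 6):
--             if inn <= t:
--                 sums[t][0] += h
--                 sums[t][1] += a
--     for t in (6, 5, 4, 3):
--         h, a = sums[t]
--         deficit = (a - h) if home_wins else (h - a)
--         if deficit >= 3: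
--             return (True, deficit, t)
--     return (False, 0, 0)
-- ===== Notes on version B (the rewrite author's own statement) =====
-- stated objective: faster
-- what changed: B replaces A's eight full scans of innings (two _cumulative_through calls per threshold) with one single pass that maintains running home/away totals for all four thresholds, followed by a constant-size scan of the thresholds.
import Mathlib
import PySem

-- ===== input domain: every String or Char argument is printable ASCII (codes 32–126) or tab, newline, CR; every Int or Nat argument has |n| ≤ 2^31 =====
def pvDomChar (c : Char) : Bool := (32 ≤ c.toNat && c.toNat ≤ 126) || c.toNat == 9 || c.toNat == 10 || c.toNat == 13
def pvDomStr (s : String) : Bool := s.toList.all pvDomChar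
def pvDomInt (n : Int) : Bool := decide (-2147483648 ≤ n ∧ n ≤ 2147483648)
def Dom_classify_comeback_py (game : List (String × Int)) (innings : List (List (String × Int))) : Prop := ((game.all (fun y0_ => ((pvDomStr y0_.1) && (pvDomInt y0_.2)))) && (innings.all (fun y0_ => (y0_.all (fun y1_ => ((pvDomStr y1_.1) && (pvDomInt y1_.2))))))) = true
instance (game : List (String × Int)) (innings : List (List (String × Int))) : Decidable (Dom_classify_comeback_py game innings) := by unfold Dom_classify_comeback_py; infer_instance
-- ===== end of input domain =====

-- B replaces A's eight full scans of `innings` with one pass keeping running totals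
-- for all four thresholds; return value equivalence, KeyError inputs excluded by Pre_.

-- shared helper: `_int(row.get(k))` on an int-valued dict = first-match lookup, default 0
def pvLookup (row : List (String × Int)) (k : String) : Int :=
  match row.find? (fun p => p.1 == k) with
  | some p => p.2
  | none => 0

-- ===== PORT A =====
-- _cumulative_through: a full scan of innings per call
def cumulativeThrough (innings : List (List (String × Int))) (side : String) (upTo : Int) : Int :=
  innings.foldl (fun total row =>
    if pvLookup row "inning" ≤ upTo then total + pvLookup row side else total) 0

-- the `for through_inn in (6,5,4,3)` early-return loop
def scanThresh (home_wins : Bool) (innings : List (List (String × Int))) : List Int → Bool × Int × Int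
  | [] => (false, 0, 0)
  | t :: ts =>
    let h := cumulativeThrough innings "home" t
    let a := cumulativeThrough innings "away" t
    let deficit := if home_wins then a - h else h - a
    if deficit ≥ 3 then (true, deficit, t) else scanThresh home_wins innings ts

def classify_comeback_py (game : List (String × Int)) (innings : List (List (String × Int))) : Bool × Int × Int :=
  if innings = [] then (false, 0, 0)
  else
    -- game["home_score"] / game["away_score"]: KeyError (missing key) excluded by Pre_
    let home_wins := pvLookup game "home_score" > pvLookup game "away_score"
    scanThresh home_wins innings [6, 5, 4, 3]

-- ===== PORT B =====
-- eight running totals (h3,h4,h5,h6,a3,a4,a5,a6), one pass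
def bigStep (s : Int × Int × Int × Int × Int × Int × Int × Int) (row : List (String × Int)) :
    Int × Int × Int × Int × Int × Int × Int × Int :=
  let inn := pvLookup row "inning"
  let h := pvLookup row "home"
  let a := pvLookup row "away"
  ((if inn ≤ 3 then s.1 + h else s.1),
   (if inn ≤ 4 then s.2.1 + h else s.2.1),
   (if inn ≤ 5 then s.2.2.1 + h else s.2.2.1),
   (if inn ≤ 6 then s.2.2.2.1 + h else s.2.2.2.1),
   (if inn ≤ 3 then s.2.2.2.2.1 + a else s.2.2.2.2.1),
   (if inn ≤ 4 then s.2.2.2.2.2.1 + a else s.2.2.2.2.2.1),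
   (if inn ≤ 5 then s.2.2.2.2.2.2.1 + a else s.2.2.2.2.2.2.1),
   (if inn ≤ 6 then s.2.2.2.2.2.2.2 + a else s.2.2.2.2.2.2.2))

-- the final `for t in (6,5,4,3)` loop reading the precomputed sums
def pickThresh (home_wins : Bool) : List (Int × Int × Int) → Bool × Int × Int
  | [] => (false, 0, 0)
  | (t, h, a) :: rest =>
    let deficit := if home_wins then a - h else h - a
    if deficit ≥ 3 then (true, deficit, t) else pickThresh home_wins rest

def classify_comeback_py_alt (game : List (String × Int)) (innings : List (List (String × Int))) : Bool × Int × Int :=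
  if innings = [] then (false, 0, 0)
  else
    let home_wins := pvLookup game "home_score" > pvLookup game "away_score"
    let s := innings.foldl bigStep (0, 0, 0, 0, 0, 0, 0, 0)
    pickThresh home_wins
      [(6, s.2.2.2.1, s.2.2.2.2.2.2.2), (5, s.2.2.1, s.2.2.2.2.2.2.1),
       (4, s.2.1, s.2.2.2.2.2.1), (3, s.1, s.2.2.2.2.1)]

-- ===== PRECONDITION & SPEC =====
-- Pre_ excludes exactly the inputs where A raises KeyError: innings nonempty and
-- "home_score" or "away_score" missing from game.
def Pre_classify_comeback_py (game : List (String × Int)) (innings : List (List (String × Int))) : Prop :=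
  innings = [] ∨ ("home_score" ∈ game.map Prod.fst ∧ "away_score" ∈ game.map Prod.fst)
instance (game : List (String × Int)) (innings : List (List (String × Int))) : Decidable (Pre_classify_comeback_py game innings) := by unfold Pre_classify_comeback_py; infer_instance

def pvWitness_classify_comeback_py : (List (String × Int)) × (List (List (String × Int))) :=
  ([("home_score", 5), ("away_score", 3)], [[("inning", 1), ("home", 0), ("away", 3)]])

def Spec_classify_comeback_py (game : List (String × Int)) (innings : List (List (String × Int))) (out : Bool × Int × Int) : Prop := out = classify_comeback_py_alt game innings
instance (game : List (String × Int)) (innings : List (List (String × Int))) (out : Bool × Int × Int) : Decidable (Spec_classify_comeback_py game innings out) := by unfold Spec_classify_comeback_py; infer_instance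

-- ===== CLAIM (what is proved, stated in full; the proofs are below) =====
def Claim_equal_classify_comeback_py : Prop := ∀ (game : List (String × Int)) (innings : List (List (String × Int))), Dom_classify_comeback_py game innings → Pre_classify_comeback_py game innings → Spec_classify_comeback_py game innings (classify_comeback_py game innings)

-- ===== LEMMAS AND PROOFS =====

-- cumulativeThrough's foldl shifted by an arbitrary start value
theorem cumShift (innings : List (List (String × Int))) (side : String) (upTo : Int) :
    ∀ (a : Int),
      innings.foldl (fun total row =>
        if pvLookup row "inning" ≤ upTo then total + pvLookup row side else total) a
      = a + cumulativeThrough innings side upTo := by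
  unfold cumulativeThrough
  induction innings with
  | nil => intro a; simp
  | cons r rs ih =>
    intro a
    simp only [List.foldl_cons]
    rw [ih (if pvLookup r "inning" ≤ upTo then a + pvLookup r side else a),
        ih (if pvLookup r "inning" ≤ upTo then (0 : Int) + pvLookup r side else 0)]
    split <;> ring

-- the single pass computes exactly the eight per-threshold cumulative sums
theorem bigfold (innings : List (List (String × Int))) :
    innings.foldl bigStep (0, 0, 0, 0, 0, 0, 0, 0) =
      (cumulativeThrough innings "home" 3, cumulativeThrough innings "home" 4,
       cumulativeThrough innings "home" 5, cumulativeThrough innings "home" 6,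
       cumulativeThrough innings "away" 3, cumulativeThrough innings "away" 4,
       cumulativeThrough innings "away" 5, cumulativeThrough innings "away" 6) := by
  have key : ∀ (l : List (List (String × Int)))
      (s : Int × Int × Int × Int × Int × Int × Int × Int),
      l.foldl bigStep s =
        (s.1 + cumulativeThrough l "home" 3,
         s.2.1 + cumulativeThrough l "home" 4,
         s.2.2.1 + cumulativeThrough l "home" 5,
         s.2.2.2.1 + cumulativeThrough l "home" 6,
         s.2.2.2.2.1 + cumulativeThrough l "away" 3,
         s.2.2.2.2.2.1 + cumulativeThrough l "away" 4,
         s.2.2.2.2.2.2.1 + cumulativeThrough l "away" 5,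
         s.2.2.2.2.2.2.2 + cumulativeThrough l "away" 6) := by
    intro l
    induction l with
    | nil => intro s; simp [cumulativeThrough]
    | cons r rs ih =>
      intro s
      have e : ∀ (side : String) (upTo : Int), cumulativeThrough (r :: rs) side upTo
          = (if pvLookup r "inning" ≤ upTo then pvLookup r side else 0)
            + cumulativeThrough rs side upTo := by
        intro side upTo
        conv_lhs => unfold cumulativeThrough
        simp only [List.foldl_cons]
        rw [cumShift rs side upTo]
        split <;> ring
      simp only [List.foldl_cons, ih, e, bigStep, Prod.mk.injEq]
      refine ⟨?_, ?_, ?_, ?_, ?_, ?_, ?_, ?_⟩ <;> (split <;> ring)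
  rw [key]
  simp

-- ===== VERDICT (by name: the statement is the Claim_ definition above) =====
theorem classify_comeback_py_spec : Claim_equal_classify_comeback_py := by
  intro game innings _ _
  unfold Spec_classify_comeback_py classify_comeback_py classify_comeback_py_alt
  by_cases h : innings = []
  · simp [h]
  · simp only [if_neg h, bigfold]
    simp [scanThresh, pickThresh]
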